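-- pv_equiv track=rewrite | github.com/YHYen/Feature_Generation | Random_Pos_TrainSet.py | createSerialSetForAllLabel
-- ===== SOURCE A (Python) =====
-- def createSerialSetForAllLabel(dataset):
--     labelZeroSet, labelOneSet, labelTwoSet = [], [], []
--     for i in range(0, len(dataset)):
--         if dataset[i][0] == '0':
--             labelZeroSet.append(i)
--         if dataset[i][0] == '1':
--             labelOneSet.append(i)
--         if dataset[i][0] == '2':
--             labelTwoSet.append(i)
--     return labelZeroSet, labelOneSet, labelTwoSet
-- ===== SOURCE B (Python) =====
-- def createSerialSetForAllLabel(dataset):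
--     labelZeroSet = [i for i in range(len(dataset)) if dataset[i][0] == '0']
--     labelOneSet = [i for i in range(len(dataset)) if dataset[i][0] == '1']
--     labelTwoSet = [i for i in range(len(dataset)) if dataset[i][0] == '2']
--     return labelZeroSet, labelOneSet, labelTwoSet
-- ===== Notes on version B (the rewrite author's own statement) =====
-- stated objective: idiomatic
-- what changed: A's single loop with three branch-appends over a shared triple of accumulators is replaced by three independent list comprehensions, each scanning the dataset for exactly one label.
import Mathlib
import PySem

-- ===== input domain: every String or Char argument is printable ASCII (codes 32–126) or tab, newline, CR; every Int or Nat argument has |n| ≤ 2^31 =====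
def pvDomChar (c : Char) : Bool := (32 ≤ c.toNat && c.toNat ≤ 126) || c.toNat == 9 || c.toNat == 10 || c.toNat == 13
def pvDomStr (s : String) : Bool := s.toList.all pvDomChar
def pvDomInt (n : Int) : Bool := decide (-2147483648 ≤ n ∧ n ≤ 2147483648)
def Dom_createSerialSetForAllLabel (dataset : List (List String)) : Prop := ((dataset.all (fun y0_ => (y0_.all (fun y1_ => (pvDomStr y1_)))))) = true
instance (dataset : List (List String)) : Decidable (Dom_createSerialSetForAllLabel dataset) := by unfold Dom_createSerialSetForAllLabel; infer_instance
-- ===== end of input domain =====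

-- B replaces A's single loop with three branch-appends by three independent one-label scans (more idiomatic; same cost).


-- ===== PORT A =====
-- dataset[i][0]: first element of row i (none = IndexError, excluded by Pre_)
def pvElem0 (dataset : List (List String)) (i : Int) : Option String :=
  (PySem.List.pyGet? dataset i).bind (fun row => PySem.List.pyGet? row 0)

def createSerialSetForAllLabel (dataset : List (List String)) : List Int × List Int × List Int :=
  (PySem.List.pyRange 0 (dataset.length : Int) 1).foldl
    (fun acc i =>
      let z := if pvElem0 dataset i == some "0" then acc.1 ++ [i] else acc.1
      let o := if pvElem0 dataset i == some "1" then acc.2.1 ++ [i] else acc.2.1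
      let t := if pvElem0 dataset i == some "2" then acc.2.2 ++ [i] else acc.2.2
      (z, o, t))
    ([], [], [])

-- ===== PORT B =====
def createSerialSetForAllLabel_alt (dataset : List (List String)) : List Int × List Int × List Int :=
  ((PySem.List.pyRange 0 (dataset.length : Int) 1).filter (fun i => pvElem0 dataset i == some "0"),
   (PySem.List.pyRange 0 (dataset.length : Int) 1).filter (fun i => pvElem0 dataset i == some "1"),
   (PySem.List.pyRange 0 (dataset.length : Int) 1).filter (fun i => pvElem0 dataset i == some "2"))

-- ===== PRECONDITION & SPEC =====
-- Pre_ excludes datasets containing an empty row: there dataset[i][0] raises IndexError in both A and B.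
def Pre_createSerialSetForAllLabel (dataset : List (List String)) : Prop :=
  ∀ row ∈ dataset, row ≠ []
instance (dataset : List (List String)) : Decidable (Pre_createSerialSetForAllLabel dataset) := by unfold Pre_createSerialSetForAllLabel; infer_instance
def pvWitness_createSerialSetForAllLabel : List (List String) := [["0", "a"], ["2"], ["1"], ["x"]]

def Spec_createSerialSetForAllLabel (dataset : List (List String)) (out : List Int × List Int × List Int) : Prop := out = createSerialSetForAllLabel_alt dataset
instance (dataset : List (List String)) (out : List Int × List Int × List Int) : Decidable (Spec_createSerialSetForAllLabel dataset out) := by unfold Spec_createSerialSetForAllLabel; infer_instance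

-- ===== CLAIM (what is proved, stated in full; the proofs are below) =====
def Claim_equal_createSerialSetForAllLabel : Prop := ∀ (dataset : List (List String)), Dom_createSerialSetForAllLabel dataset → Pre_createSerialSetForAllLabel dataset → Spec_createSerialSetForAllLabel dataset (createSerialSetForAllLabel dataset)

-- ===== LEMMAS AND PROOFS =====
-- Loop invariant: A's fold over any index list appends each label's filtered indices to its accumulator.
theorem pvFold_eq (dataset : List (List String)) (l : List Int)
    (z o t : List Int) :
    l.foldl
      (fun acc i =>
        let z := if pvElem0 dataset i == some "0" then acc.1 ++ [i] else acc.1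
        let o := if pvElem0 dataset i == some "1" then acc.2.1 ++ [i] else acc.2.1
        let t := if pvElem0 dataset i == some "2" then acc.2.2 ++ [i] else acc.2.2
        (z, o, t))
      (z, o, t)
    = (z ++ l.filter (fun i => pvElem0 dataset i == some "0"),
       o ++ l.filter (fun i => pvElem0 dataset i == some "1"),
       t ++ l.filter (fun i => pvElem0 dataset i == some "2")) := by
  induction l generalizing z o t with
  | nil => simp
  | cons x xs ih =>
    simp only [List.foldl_cons, List.filter_cons]
    rw [ih]
    by_cases h0 : pvElem0 dataset x == some "0" <;>
      by_cases h1 : pvElem0 dataset x == some "1" <;>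
        by_cases h2 : pvElem0 dataset x == some "2" <;>
          simp [h0, h1, h2]

-- ===== VERDICT (by name: the statement is the Claim_ definition above) =====
theorem createSerialSetForAllLabel_spec : Claim_equal_createSerialSetForAllLabel := by
  intro dataset _ _
  unfold Spec_createSerialSetForAllLabel createSerialSetForAllLabel createSerialSetForAllLabel_alt
  rw [pvFold_eq]
  simp
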